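-- pv_equiv track=rewrite | github.com/jpalat/AdventOfCode-2022 | day_1/day1.py | assign_inventory
-- ===== SOURCE A (Python) =====
-- def assign_inventory(inventory):
--     assignments = {1:0}
--     id = 1
--     for i in inventory:
--         if i == '\n':
--             id = id + 1
--         else:
--             if id in assignments.keys():
--                 total = assignments[id] + int(i)
--                 assignments[id] = total
--             else:
--                 assignments[id] = int(i)
--     return assignments
-- ===== SOURCE B (Python) =====
-- def assign_inventory(inventory):
--     # Pass 1: split into groups on '\n', converting entries to int as we go
--     # (so a malformed entry raises ValueError at the same item as the original).
--     groups = []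
--     cur = []
--     for i in inventory:
--         if i == '\n':
--             groups.append(cur)
--             cur = []
--         else:
--             cur.append(int(i))
--     groups.append(cur)
--     # Pass 2: number the groups from 1; key 1 is seeded to 0, later empty groups get no key.
--     assignments = {1: 0}
--     for idx, g in enumerate(groups, 1):
--         if g:
--             assignments[idx] = sum(g)
--     return assignments
-- ===== Notes on version B (the rewrite author's own statement) =====
-- stated objective: alternative
-- what changed: Replaces the single pass that mutates a dict keyed by a running id with a two-phase decomposition: first split the inventory into groups on newline separators, then number the groups and write each non-empty group's sum into the result dict seeded with {1:0}.
import Mathlib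
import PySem

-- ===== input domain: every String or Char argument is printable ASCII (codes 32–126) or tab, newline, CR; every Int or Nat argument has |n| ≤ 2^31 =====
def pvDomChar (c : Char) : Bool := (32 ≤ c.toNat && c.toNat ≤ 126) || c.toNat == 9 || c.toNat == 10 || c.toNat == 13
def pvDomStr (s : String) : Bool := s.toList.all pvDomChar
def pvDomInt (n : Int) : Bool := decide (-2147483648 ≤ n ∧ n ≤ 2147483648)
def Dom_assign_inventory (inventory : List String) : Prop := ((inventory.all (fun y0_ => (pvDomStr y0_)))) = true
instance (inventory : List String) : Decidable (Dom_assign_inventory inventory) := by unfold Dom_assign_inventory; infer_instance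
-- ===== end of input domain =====

-- B replaces A's single mutating pass with a split-into-groups pass followed by a
-- numbering pass (alternative decomposition, same cost). int(i) → ofStr?, with
-- `.getD 0`; Pre_ excludes the inputs where Python's int() raises, so the default
-- is never taken inside Pre_.

-- ===== PORT A =====
def pvInt (s : String) : Int := (PySem.Int.ofStr? s).getD 0

def aStep (st : PySem.Dict Int Int × Int) (i : String) : PySem.Dict Int Int × Int :=
  if i = "\n" then (st.1, st.2 + 1)
  else
    match st.1.get? st.2 with
    | some t => (st.1.insert st.2 (t + pvInt i), st.2)
    | none => (st.1.insert st.2 (pvInt i), st.2)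

def assign_inventory (inventory : List String) : List (Int × Int) :=
  (inventory.foldl aStep (PySem.Dict.ofList [((1 : Int), (0 : Int))], 1)).1.items

-- ===== PORT B =====
def bGroup (st : List (List Int) × List Int) (i : String) : List (List Int) × List Int :=
  if i = "\n" then (st.1 ++ [st.2], []) else (st.1, st.2 ++ [pvInt i])

def bAssign (idx : Int) (groups : List (List Int)) (d : PySem.Dict Int Int) : PySem.Dict Int Int :=
  match groups with
  | [] => d
  | g :: gs => bAssign (idx + 1) gs (if g = [] then d else d.insert idx g.sum)

def assign_inventory_alt (inventory : List String) : List (Int × Int) :=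
  let st := inventory.foldl bGroup ([], [])
  (bAssign 1 (st.1 ++ [st.2]) (PySem.Dict.ofList [((1 : Int), (0 : Int))])).items

-- ===== PRECONDITION & SPEC =====
-- Pre_ excludes exactly the inputs where Python's int() raises ValueError: every entry
-- must be the separator "\n" or an integer literal (optional surrounding whitespace,
-- optional sign, then digits with single underscores between digits).
def pvIsWs (c : Char) : Bool := c = ' ' || c = '\t' || c = '\n' || c = '\r'
def pvDigitsTail : List Char → Bool
  | [] => true
  | ['_'] => false
  | '_' :: c :: cs => c.isDigit && pvDigitsTail cs
  | c :: cs => c.isDigit && pvDigitsTail cs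
def pvDigits : List Char → Bool
  | [] => false
  | c :: cs => c.isDigit && pvDigitsTail cs
def pvIntCore : List Char → Bool
  | '+' :: cs => pvDigits cs
  | '-' :: cs => pvDigits cs
  | cs => pvDigits cs
def pvIsIntStr (s : String) : Bool :=
  pvIntCore (((s.toList.dropWhile pvIsWs).reverse.dropWhile pvIsWs).reverse)

def Pre_assign_inventory (inventory : List String) : Prop :=
  ∀ s ∈ inventory, s = "\n" ∨ pvIsIntStr s = true
instance (inventory : List String) : Decidable (Pre_assign_inventory inventory) := by
  unfold Pre_assign_inventory; infer_instance
def pvWitness_assign_inventory : List String := ["42", "1", " 6", "3", "100", "5", "42"]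

def Spec_assign_inventory (inventory : List String) (out : List (Int × Int)) : Prop := out = assign_inventory_alt inventory
instance (inventory : List String) (out : List (Int × Int)) : Decidable (Spec_assign_inventory inventory out) := by unfold Spec_assign_inventory; infer_instance

-- ===== CLAIM (what is proved, stated in full; the proofs are below) =====
def Claim_equal_assign_inventory : Prop := ∀ (inventory : List String), Dom_assign_inventory inventory → Pre_assign_inventory inventory → Spec_assign_inventory inventory (assign_inventory inventory)

-- ===== LEMMAS AND PROOFS =====

theorem dict_insert_insert_self (d : PySem.Dict Int Int) (k a b : Int) :
    (d.insert k a).insert k b = d.insert k b := by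
  apply PySem.Dict.ext
  rw [PySem.Dict.items_insert, PySem.Dict.items_insert, PySem.Dict.items_insert,
    PySem.Dict.contains_insert]
  by_cases h : d.contains k
  · simp only [h, Bool.or_true, if_true, List.map_map]
    refine List.map_congr_left fun p _ => ?_
    by_cases hp : p.1 = k <;> simp [hp]
  · have hk : ∀ p ∈ d.items, p.1 ≠ k := by
      intro p hp hc
      exact h ((PySem.Dict.contains_iff_mem_keys _ _).mpr
        (hc ▸ PySem.Dict.mem_keys_of_mem_items d hp))
    have h1 : ∀ (c : Int) (its : List (Int × Int)), (∀ p ∈ its, p.1 ≠ k) →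
        its.map (fun p => if p.1 == k then (k, c) else p) = its := by
      intro c its hits
      induction its with
      | nil => rfl
      | cons q qs ihq =>
        have hq : (q.1 == k) = false := by simpa using hits q (List.mem_cons_self ..)
        simp only [List.map_cons, hq, Bool.false_eq_true, if_false]
        rw [ihq (fun p hp => hits p (List.mem_cons_of_mem _ hp))]
    simp only [h, Bool.or_false, beq_self_eq_true, if_true, Bool.false_eq_true, if_false,
      List.map_append, List.map_cons, List.map_nil]
    rw [h1 b d.items hk]

theorem bAssign_append (gs : List (List Int)) (g : List Int) :
    ∀ (k : Int) (d : PySem.Dict Int Int),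
      bAssign k (gs ++ [g]) d =
        if g = [] then bAssign k gs d else (bAssign k gs d).insert (k + gs.length) g.sum := by
  induction gs with
  | nil => intro k d; simp [bAssign]
  | cons g' gs ih =>
    intro k d
    simp only [List.cons_append, bAssign, ih, List.length_cons]
    have : k + 1 + (gs.length : Int) = k + ((gs.length : Int) + 1) := by ring
    rw [this]
    push_cast
    ring_nf

theorem bAssign_get?_high (gs : List (List Int)) :
    ∀ (k j : Int) (d : PySem.Dict Int Int), k + gs.length ≤ j →
      (bAssign k gs d).get? j = d.get? j := by
  induction gs with
  | nil => intro k j d _; rfl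
  | cons g gs ih =>
    intro k j d hj
    simp only [List.length_cons] at hj
    have hj' : k + 1 + (gs.length : Int) ≤ j := by push_cast at hj ⊢; omega
    have hk : j ≠ k := by
      have h0 : (0 : Int) ≤ (gs.length : Int) := Int.natCast_nonneg _
      omega
    simp only [bAssign]
    rw [ih (k + 1) j _ hj']
    by_cases hg : g = [] <;> simp [hg, PySem.Dict.get?_insert, hk]

def pvBase : PySem.Dict Int Int := PySem.Dict.ofList [((1 : Int), (0 : Int))]

theorem base_get? (j : Int) : pvBase.get? j = if j = 1 then some 0 else none := by
  have hb : pvBase = PySem.Dict.empty.insert 1 0 := by decide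
  rw [hb, PySem.Dict.get?_insert]
  by_cases h : j = 1 <;> simp [h, PySem.Dict.get?_empty]

theorem d_of_get? (gs : List (List Int)) (cur : List Int) :
    (bAssign 1 (gs ++ [cur]) pvBase).get? (1 + (gs.length : Int)) =
      if cur = [] then (if gs.length = 0 then some 0 else none) else some cur.sum := by
  rw [bAssign_append]
  by_cases hc : cur = []
  · rw [if_pos hc, if_pos hc]
    rw [bAssign_get?_high gs 1 _ _ (le_refl _), base_get?]
    by_cases hl : gs.length = 0
    · simp [hl]
    · have : (1 : Int) + gs.length ≠ 1 := by
        have : (1 : Int) ≤ gs.length := by exact_mod_cast Nat.one_le_iff_ne_zero.mpr hl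
        omega
      simp [hl, this]
  · rw [if_neg hc, if_neg hc, PySem.Dict.get?_insert_self]

theorem main_inv (l : List String) :
    ∀ (gs : List (List Int)) (cur : List Int),
      l.foldl aStep (bAssign 1 (gs ++ [cur]) pvBase, (gs.length : Int) + 1) =
        ((bAssign 1 ((l.foldl bGroup (gs, cur)).1 ++ [(l.foldl bGroup (gs, cur)).2]) pvBase),
          (((l.foldl bGroup (gs, cur)).1.length : Int) + 1)) := by
  induction l with
  | nil => intro gs cur; rfl
  | cons i l ih =>
    intro gs cur
    by_cases hni : i = "\n"
    · have ha : aStep (bAssign 1 (gs ++ [cur]) pvBase, (gs.length : Int) + 1) i =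
          (bAssign 1 ((gs ++ [cur]) ++ [[]]) pvBase, ((gs ++ [cur]).length : Int) + 1) := by
        simp only [aStep, if_pos hni, Prod.mk.injEq]
        refine ⟨?_, ?_⟩
        · rw [bAssign_append (gs ++ [cur]) [] 1 pvBase, if_pos rfl]
        · simp only [List.length_append, List.length_cons, List.length_nil]; push_cast; ring
      have hb : bGroup (gs, cur) i = (gs ++ [cur], []) := by simp [bGroup, hni]
      simp only [List.foldl_cons, ha, hb, ih]
    · have hget := d_of_get? gs cur
      have hid : (gs.length : Int) + 1 = 1 + (gs.length : Int) := by ring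
      have hne : cur ++ [pvInt i] ≠ [] := by simp
      have ha : aStep (bAssign 1 (gs ++ [cur]) pvBase, (gs.length : Int) + 1) i =
          (bAssign 1 (gs ++ [cur ++ [pvInt i]]) pvBase, (gs.length : Int) + 1) := by
        rw [bAssign_append gs (cur ++ [pvInt i]) 1 pvBase, if_neg hne]
        simp only [aStep, if_neg hni, hid, hget]
        by_cases hc : cur = []
        · rw [if_pos hc]
          by_cases hl : gs.length = 0
          · rw [if_pos hl]
            rw [bAssign_append gs cur 1 pvBase, if_pos hc]
            simp [hc]
          · rw [if_neg hl]
            rw [bAssign_append gs cur 1 pvBase, if_pos hc]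
            simp [hc]
        · rw [if_neg hc]
          rw [bAssign_append gs cur 1 pvBase, if_neg hc]
          simp [dict_insert_insert_self, List.sum_append]
      have hb : bGroup (gs, cur) i = (gs, cur ++ [pvInt i]) := by simp [bGroup, hni]
      simp only [List.foldl_cons, ha, hb, ih]

-- ===== VERDICT (by name: the statement is the Claim_ definition above) =====
theorem assign_inventory_spec : Claim_equal_assign_inventory := by
  intro inventory _ _
  unfold Spec_assign_inventory assign_inventory assign_inventory_alt
  have h := main_inv inventory [] []
  simp only [List.nil_append, List.length_nil, Nat.cast_zero, zero_add] at h
  have : bAssign 1 [[]] pvBase = pvBase := by simp [bAssign]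
  rw [this] at h
  exact congrArg (fun p => PySem.Dict.items p.1) h
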